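-- pv_equiv track=rewrite | github.com/qcqced123/coding_test | programmers/신고결과받기.py | solution
-- ===== SOURCE A (Python) =====
-- from collections import defaultdict
--
-- def solution(id_list, report, k):
--     """
--     problem link:
--         https://school.programmers.co.kr/learn/courses/30/lessons/92334
--
--     summary:
--         1) 불량 이용자 신고, 처리 결과 메일로 자동 발송
--             - 한번에 한 건씩 처리
--             - 한 유저 여러번 고소 가능, 그러나 모두 1회로 간주
--             - 서로 다른 유저에게 k번 이상 신고, 해당 유저 정지
--                 - 정지: 신고한 모든 유저에게 결과 발송
--     args:
--         report: 신고 유저, 신고 당한 유저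
--         k: 정지 기준
--
--     solution:
--         1) O(id_list*report)
--             - 사전 두 개 준비
--
--     """
--     point_dict, pointed_dict = {i: 0 for i in id_list}, defaultdict(set)
--     for context in report:
--         pointer, pointed = context.split()
--         pointed_dict[pointed].add(pointer)
--
--     for i, j in pointed_dict.items():
--         if len(j) >= k:
--             for z in j:
--                 point_dict[z] += 1
--     answer = list(point_dict.values())
--     return answer
-- ===== SOURCE B (Python) =====
-- def solution(id_list, report, k):
--     pairs = {tuple(c.split()) for c in report}
--     targets = [p for _, p in pairs]
--     banned = {p for p in targets if targets.count(p) >= k}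
--     return [sum(1 for ptr, p in pairs if ptr == i and p in banned)
--             for i in dict.fromkeys(id_list)]
-- ===== Notes on version B (the rewrite author's own statement) =====
-- stated objective: alternative
-- what changed: B drops A's defaultdict-of-reporter-sets grouping and incrementing point_dict entirely: it computes each output value independently, counting for each id the deduplicated (pointer, pointed) pairs whose pointed user lies in a banned set derived by direct occurrence counting in the pointed column.
import Mathlib
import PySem

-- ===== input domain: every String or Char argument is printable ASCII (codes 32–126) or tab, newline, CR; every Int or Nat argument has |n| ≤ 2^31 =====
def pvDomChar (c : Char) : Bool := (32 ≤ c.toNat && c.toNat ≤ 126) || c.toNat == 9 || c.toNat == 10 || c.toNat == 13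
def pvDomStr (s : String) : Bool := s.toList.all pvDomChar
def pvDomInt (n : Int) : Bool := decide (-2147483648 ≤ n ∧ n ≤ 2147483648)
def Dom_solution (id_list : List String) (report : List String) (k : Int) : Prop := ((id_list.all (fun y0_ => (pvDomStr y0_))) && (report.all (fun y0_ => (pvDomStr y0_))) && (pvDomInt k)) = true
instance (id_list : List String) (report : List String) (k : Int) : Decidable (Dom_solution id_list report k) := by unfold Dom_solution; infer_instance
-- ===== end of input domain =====

-- B: computes each output value independently — for every id, count the dedup (pointer, pointed)
-- pairs whose pointed user is in a banned set built by direct occurrence counting — instead of A's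
-- defaultdict-of-sets grouping with dict increments (objective: alternative; B trades A's linear
-- dict accumulation for per-user counting passes).


-- ===== PORT A =====
def solution (id_list : List String) (report : List String) (k : Int) : List Int :=
  -- point_dict, pointed_dict = {i: 0 for i in id_list}, defaultdict(set)
  let point_dict : PySem.Dict String Int :=
    id_list.foldl (fun d i => d.insert i 0) PySem.Dict.empty
  -- for context in report: pointer, pointed = context.split(); pointed_dict[pointed].add(pointer)
  let pointed_dict : PySem.Dict String (PySem.Set String) :=
    report.foldl (fun d context =>
      match PySem.Str.split₀ context with
      | [pointer, pointed] => d.modify pointed [] (fun s => PySem.Set.add s pointer)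
      | _ => d   -- Python raises ValueError here (unpacking); excluded by Pre_solution
      ) PySem.Dict.empty
  -- for i, j in pointed_dict.items(): if len(j) >= k: for z in j: point_dict[z] += 1
  let point_dict :=
    pointed_dict.items.foldl (fun pd ij =>
      if k ≤ (ij.2.length : Int) then
        ij.2.foldl (fun pd z => pd.insert z (pd.getD z 0 + 1)) pd
        -- point_dict[z] += 1; under Pre_solution z is a key, otherwise Python raises KeyError
      else pd) point_dict
  point_dict.values

-- ===== PORT B =====
def solution_alt (id_list : List String) (report : List String) (k : Int) : List Int :=
  -- pairs = {tuple(c.split()) for c in report}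
  let pairs : PySem.Set (String × String) :=
    PySem.Set.ofList (report.map (fun c =>
      -- tuple(c.split()); A unpacks it into exactly two words — Python raises ValueError on
      -- any other length, excluded by Pre_solution
      let ws := PySem.Str.split₀ c
      (ws.getD 0 "", ws.getD 1 "")))
  -- targets = [p for _, p in pairs]  (consumed only by count/membership: order-independent)
  let targets : List String := pairs.map (·.2)
  -- banned = {p for p in targets if targets.count(p) >= k}
  let banned : PySem.Set String :=
    PySem.Set.ofList (targets.filter (fun p => k ≤ (targets.count p : Int)))
  -- [sum(1 for ptr, p in pairs if ptr == i and p in banned) for i in dict.fromkeys(id_list)]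
  (PySem.List.dedup id_list).map (fun i =>
    ((pairs.countP (fun q => q.1 == i && decide (q.2 ∈ banned))) : Int))

-- ===== PRECONDITION & SPEC =====
-- the (pointer, pointed) pair a report line denotes; used only by Pre_solution
def pvParse (c : String) : String × String :=
  let ws := PySem.Str.split₀ c
  (ws.getD 0 "", ws.getD 1 "")

-- Pre_ excludes exactly the inputs where A raises: a report line not splitting into exactly two
-- words (ValueError on unpacking), or a reporter of a user with ≥ k distinct reporters who is
-- not in id_list (KeyError on point_dict[z] += 1).
def Pre_solution (id_list : List String) (report : List String) (k : Int) : Prop :=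
  (∀ c ∈ report, (PySem.Str.split₀ c).length = 2) ∧
  (∀ c ∈ report,
    k ≤ (((PySem.Set.ofList (report.map pvParse)).filter
            (fun q => q.2 == (pvParse c).2)).length : Int) →
    (pvParse c).1 ∈ id_list)
instance (id_list : List String) (report : List String) (k : Int) : Decidable (Pre_solution id_list report k) := by unfold Pre_solution; infer_instance

def pvWitness_solution : List String × List String × Int :=
  (["muzi", "frodo", "apeach", "neo"],
   ["muzi frodo", "apeach frodo", "frodo neo", "muzi neo", "apeach muzi"], 2)

def Spec_solution (id_list : List String) (report : List String) (k : Int) (out : List Int) : Prop := out = solution_alt id_list report k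
instance (id_list : List String) (report : List String) (k : Int) (out : List Int) : Decidable (Spec_solution id_list report k out) := by unfold Spec_solution; infer_instance

-- ===== CLAIM (what is proved, stated in full; the proofs are below) =====
def Claim_equal_solution : Prop := ∀ (id_list : List String) (report : List String) (k : Int), Dom_solution id_list report k → Pre_solution id_list report k → Spec_solution id_list report k (solution id_list report k)

-- ===== LEMMAS AND PROOFS =====

-- the dedup pair list, the reporter set of a pointed user, and A's flattened increment list
def pvP (report : List String) : List (String × String) := report.map pvParse
def pvS (report : List String) : PySem.Set (String × String) := PySem.Set.ofList (pvP report)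
def pvR (report : List String) (p : String) : PySem.Set String :=
  PySem.Set.ofList (((pvP report).filter (fun q => q.2 == p)).map (·.1))
def pvBump (pd : PySem.Dict String Int) (z : String) : PySem.Dict String Int :=
  pd.insert z (pd.getD z 0 + 1)
def pvSeed (id_list : List String) : PySem.Dict String Int :=
  id_list.foldl (fun d i => d.insert i 0) PySem.Dict.empty
def pvK (report : List String) : PySem.Set String := PySem.Set.ofList ((pvP report).map (·.2))
def pvLA (report : List String) (k : Int) : List String :=
  (pvK report).flatMap (fun p => if k ≤ ((pvR report p).length : Int) then pvR report p else [])
def pvLB (report : List String) (k : Int) : List String :=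
  ((pvS report).filter (fun q => decide (k ≤ ((pvR report q.2).length : Int)))).map (·.1)

theorem pv_nodup_R (report : List String) (p : String) : (pvR report p).Nodup :=
  PySem.Set.nodup_ofList _

theorem pv_split2_parse (c : String) (h : (PySem.Str.split₀ c).length = 2) :
    PySem.Str.split₀ c = [(pvParse c).1, (pvParse c).2] := by
  unfold pvParse
  rcases hs : PySem.Str.split₀ c with _ | ⟨a, _ | ⟨b, _ | _⟩⟩ <;> simp_all

theorem pv_grp_getD (P : List (String × String)) (d : PySem.Dict String (PySem.Set String))
    (p : String) :
    (P.foldl (fun d q => d.modify q.2 [] (fun s => PySem.Set.add s q.1)) d).getD p [] =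
      PySem.Set.update (d.getD p []) ((P.filter (fun q => q.2 == p)).map (·.1)) := by
  induction P generalizing d with
  | nil => simp [PySem.Set.update_nil]
  | cons q P ih =>
      simp only [List.foldl_cons, ih, List.filter_cons]
      by_cases hqp : q.2 = p
      · subst hqp
        simp [PySem.Set.update_cons]
      · have : (q.2 == p) = false := by simp [hqp]
        simp [this, PySem.Dict.getD_modify, Ne.symm hqp]

theorem pv_count_map {α β : Type} [BEq β] [LawfulBEq β] (f : α → β) (l : List α) (b : β) :
    (l.map f).count b = l.countP (fun x => f x == b) := by
  induction l with
  | nil => rfl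
  | cons x l ih => simp [List.count_cons, List.countP_cons, ih]

theorem pv_foldl_flatMap {α β δ : Type} (l : List α) (g : α → List β) (f : δ → β → δ)
    (init : δ) :
    l.foldl (fun acc x => (g x).foldl f acc) init = (l.flatMap g).foldl f init := by
  induction l generalizing init with
  | nil => rfl
  | cons x l ih => simp [List.flatMap_cons, List.foldl_append, ih]

theorem pv_update_of_forall_mem {s : PySem.Set String} {l : List String}
    (h : ∀ x ∈ l, x ∈ s) : PySem.Set.update s l = s := by
  induction l generalizing s with
  | nil => exact PySem.Set.update_nil s
  | cons x l ih =>
      rw [PySem.Set.update_cons, PySem.Set.add_of_mem (h x (by simp))]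
      exact ih fun y hy => h y (by simp [hy])

-- the reporter set of p is the pointer column of the dedup pair list restricted to p
theorem pv_R_eq_filter (P : List (String × String)) (p : String) :
    PySem.Set.ofList ((P.filter (fun q => q.2 == p)).map (·.1)) =
      ((PySem.Set.ofList P).filter (fun q => q.2 == p)).map (·.1) := by
  induction P using List.reverseRecOn with
  | nil => rfl
  | append_singleton P q ih =>
      rw [List.filter_append, List.map_append, PySem.Set.ofList_append_singleton,
        PySem.Set.add_eq_ite]
      by_cases hq : q ∈ PySem.Set.ofList P
      · have hqP : q ∈ P := (PySem.Set.mem_ofList _ _).1 hq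
        simp only [if_pos hq]
        by_cases hqp : q.2 = p
        · have hf : List.filter (fun q' => q'.2 == p) [q] = [q] := by simp [hqp]
          rw [hf]
          have hmem : q.1 ∈ PySem.Set.ofList ((P.filter (fun q' => q'.2 == p)).map (·.1)) := by
            rw [PySem.Set.mem_ofList]
            exact List.mem_map_of_mem (List.mem_filter.2 ⟨hqP, by simp [hqp]⟩)
          rw [List.map_cons, List.map_nil, PySem.Set.ofList_append_singleton,
            PySem.Set.add_of_mem hmem, ih]
        · have hf : List.filter (fun q' => q'.2 == p) [q] = [] := by simp [hqp]
          simp only [hf, List.map_nil, List.append_nil]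
          exact ih
      · simp only [if_neg hq, List.filter_append, List.map_append]
        by_cases hqp : q.2 = p
        · have hf : List.filter (fun q' => q'.2 == p) [q] = [q] := by simp [hqp]
          rw [hf]
          have hnot : q.1 ∉ PySem.Set.ofList ((P.filter (fun q' => q'.2 == p)).map (·.1)) := by
            rw [PySem.Set.mem_ofList]
            rintro hmem
            rcases List.mem_map.1 hmem with ⟨q', hq', hfst⟩
            rcases List.mem_filter.1 hq' with ⟨hq'P, hsnd⟩
            have : q' = q := by
              rcases q with ⟨q1, q2⟩; rcases q' with ⟨q1', q2'⟩
              simp only [beq_iff_eq] at hsnd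
              simp_all
            exact hq ((PySem.Set.mem_ofList _ _).2 (this ▸ hq'P))
          rw [List.map_cons, List.map_nil, PySem.Set.ofList_append_singleton,
            PySem.Set.add_of_not_mem hnot, ih]
        · have hf : List.filter (fun q' => q'.2 == p) [q] = [] := by simp [hqp]
          simp only [hf, List.map_nil, List.append_nil]
          exact ih

theorem pv_mem_R (report : List String) (p v : String) :
    v ∈ pvR report p ↔ (v, p) ∈ pvS report := by
  unfold pvR pvS
  rw [PySem.Set.mem_ofList, PySem.Set.mem_ofList]
  constructor
  · rintro hmem
    rcases List.mem_map.1 hmem with ⟨q, hq, hfst⟩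
    rcases List.mem_filter.1 hq with ⟨hqP, hsnd⟩
    rcases q with ⟨q1, q2⟩
    simp only [beq_iff_eq] at hsnd
    simp only at hfst
    subst hfst; subst hsnd; exact hqP
  · intro hmem
    exact List.mem_map_of_mem (List.mem_filter.2 ⟨hmem, by simp⟩)

theorem pv_len_R (report : List String) (p : String) :
    (pvR report p).length = ((pvS report).filter (fun q => q.2 == p)).length := by
  rw [pvR, pv_R_eq_filter, List.length_map]; rfl

-- counting increments on the A side
theorem pv_count_flat_ite (K : List String) (g : String → List String) (cond : String → Prop)
    [DecidablePred cond] (hnd : ∀ p, (g p).Nodup) (v : String) :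
    (K.flatMap (fun p => if cond p then g p else [])).count v =
      K.countP (fun p => decide (cond p) && decide (v ∈ g p)) := by
  induction K with
  | nil => rfl
  | cons p K ih =>
      rw [List.flatMap_cons, List.count_append, List.countP_cons, ih]
      by_cases hc : cond p
      · by_cases hv : v ∈ g p
        · simp [hc, hv, List.count_eq_one_of_mem (hnd p) hv]
          omega
        · simp [hc, hv, List.count_eq_zero.2 hv]
      · simp [hc]

-- the central bijection: qualifying pairs (v, p) vs pointed users p with v among ≥ k reporters
theorem pv_count_LA_LB (report : List String) (k : Int) (v : String) :
    (pvLA report k).count v = (pvLB report k).count v := by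
  rw [pvLA, pv_count_flat_ite (pvK report) (fun p => pvR report p)
      (fun p => k ≤ ((pvR report p).length : Int)) (fun p => pv_nodup_R report p) v,
    pvLB, pv_count_map, List.countP_filter,
    List.countP_eq_length_filter, List.countP_eq_length_filter]
  set f : String × String → Bool :=
    fun q => (q.1 == v) && decide (k ≤ ((pvR report q.2).length : Int)) with hf
  set g : String → Bool :=
    fun p => decide (k ≤ ((pvR report p).length : Int)) && decide (v ∈ pvR report p) with hg
  have hndF : (((pvS report).filter f).map (·.2)).Nodup := by
    refine List.Nodup.map_on ?_ ((PySem.Set.nodup_ofList _).filter f)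
    intro q hq q' hq' hsnd
    have h1 := (List.mem_filter.1 hq).2
    have h2 := (List.mem_filter.1 hq').2
    rw [hf, Bool.and_eq_true, beq_iff_eq] at h1 h2
    obtain ⟨q1, q2⟩ := q; obtain ⟨q1', q2'⟩ := q'
    simp_all
  have hmem : ∀ p, p ∈ ((pvS report).filter f).map (·.2) ↔ p ∈ (pvK report).filter g := by
    intro p
    constructor
    · intro hp
      rcases List.mem_map.1 hp with ⟨q, hq, hsnd⟩
      rcases List.mem_filter.1 hq with ⟨hqS, hqf⟩
      rw [hf, Bool.and_eq_true, beq_iff_eq, decide_eq_true_eq] at hqf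
      have hq_eq : q = (v, p) := by obtain ⟨q1, q2⟩ := q; simp_all
      subst hq_eq
      refine List.mem_filter.2 ⟨?_, ?_⟩
      · exact (PySem.Set.mem_ofList _ _).2
          (List.mem_map_of_mem ((PySem.Set.mem_ofList _ _).1 hqS))
      · rw [hg, Bool.and_eq_true, decide_eq_true_eq, decide_eq_true_eq]
        exact ⟨hqf.2, (pv_mem_R report p v).2 hqS⟩
    · intro hp
      rcases List.mem_filter.1 hp with ⟨hpK, hpg⟩
      rw [hg, Bool.and_eq_true, decide_eq_true_eq, decide_eq_true_eq] at hpg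
      refine List.mem_map.2 ⟨(v, p), List.mem_filter.2 ⟨(pv_mem_R report p v).1 hpg.2, ?_⟩, rfl⟩
      rw [hf]; simp [hpg.1]
  have hperm := (List.perm_ext_iff_of_nodup hndF ((PySem.Set.nodup_ofList _).filter g)).2 hmem
  have hlen := hperm.length_eq
  rw [List.length_map] at hlen
  exact hlen.symm

-- A reduced to a flat increment list over its grouped dict
theorem pv_solution_eq (id_list report : List String) (k : Int)
    (hlen : ∀ c ∈ report, (PySem.Str.split₀ c).length = 2) :
    solution id_list report k = ((pvLA report k).foldl pvBump (pvSeed id_list)).values := by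
  simp only [solution]
  have hgrp : report.foldl (fun d context =>
      match PySem.Str.split₀ context with
      | [pointer, pointed] => d.modify pointed [] (fun s => PySem.Set.add s pointer)
      | _ => d) PySem.Dict.empty =
      (pvP report).foldl (fun d q => d.modify q.2 [] (fun s => PySem.Set.add s q.1))
        PySem.Dict.empty := by
    rw [pvP, List.foldl_map]
    refine PySem.List.foldl_congr_mem report _ _ PySem.Dict.empty (fun d c hc => ?_)
    rw [pv_split2_parse c (hlen c hc)]
  rw [hgrp]
  set G := (pvP report).foldl (fun d q => d.modify q.2 [] (fun s => PySem.Set.add s q.1))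
      PySem.Dict.empty with hG
  have hkeys : G.keys = pvK report := by
    rw [hG, PySem.Dict.keys_foldl_modify_key (pvP report) (fun q => q.2) []
      (fun _ q s => PySem.Set.add s q.1) PySem.Dict.empty, PySem.Dict.keys_empty, pvK]
    rfl
  have hndK : G.keys.Nodup := by rw [hkeys]; exact PySem.Set.nodup_ofList _
  have hgetD : ∀ p, G.getD p [] = pvR report p := by
    intro p
    rw [hG, pv_grp_getD, PySem.Dict.getD_empty, pvR]
    rfl
  rw [PySem.Dict.items_eq_map_keys G hndK [], List.foldl_map, hkeys]
  congr 1
  dsimp only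
  refine Eq.trans (PySem.List.foldl_congr_mem (pvK report) _
      (fun pd p =>
        (if k ≤ ((pvR report p).length : Int) then pvR report p else []).foldl pvBump pd)
      (pvSeed id_list)
      (fun pd p _ => by
        rw [hgetD p]
        by_cases h : k ≤ ((pvR report p).length : Int)
        · simp only [if_pos h]; rfl
        · simp [h])) ?_
  rw [pv_foldl_flatMap, pvLA]

-- the A-side flat increment list only touches id_list members (this is Pre_'s second clause)
theorem pv_memA (id_list report : List String) (k : Int)
    (hkey : ∀ c ∈ report,
      k ≤ (((PySem.Set.ofList (report.map pvParse)).filter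
              (fun q => q.2 == (pvParse c).2)).length : Int) →
      (pvParse c).1 ∈ id_list) :
    ∀ x ∈ pvLA report k, x ∈ id_list := by
  intro x hx
  rw [pvLA] at hx
  rcases List.mem_flatMap.1 hx with ⟨p, hpK, hxp⟩
  by_cases hc : k ≤ ((pvR report p).length : Int)
  · rw [if_pos hc] at hxp
    have hxpS : (x, p) ∈ pvS report := (pv_mem_R report p x).1 hxp
    have hxpP : (x, p) ∈ pvP report := (PySem.Set.mem_ofList _ _).1 hxpS
    rcases List.mem_map.1 hxpP with ⟨c, hcr, hpc⟩
    have h1 : (pvParse c).1 = x := by rw [hpc]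
    have h2 : (pvParse c).2 = p := by rw [hpc]
    rw [← h1]
    apply hkey c hcr
    rw [h2]
    rw [pv_len_R, pvS, pvP] at hc
    exact hc
  · rw [if_neg hc] at hxp
    simp at hxp

-- the seed dict maps every id_list member to 0
theorem pv_seed_getD_aux (l : List String) (d : PySem.Dict String Int) (v : String) :
    (l.foldl (fun d i => d.insert i 0) d).getD v 0 =
      if v ∈ l then 0 else d.getD v 0 := by
  induction l generalizing d with
  | nil => simp
  | cons x l ih =>
      rw [List.foldl_cons, ih]
      by_cases hv : v ∈ l
      · simp [hv]
      · simp [hv, PySem.Dict.getD_insert]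

-- count of B's flat list pvLB at v = B's per-user count of qualifying pairs
theorem pv_count_LB (report : List String) (k : Int) (v : String) :
    (pvLB report k).count v =
      (pvS report).countP
        (fun q => (q.1 == v) && decide (k ≤ ((pvR report q.2).length : Int))) := by
  rw [pvLB, pv_count_map, List.countP_filter]

-- membership in B's banned set, for pairs of the dedup pair set
theorem pv_mem_banned (report : List String) (k : Int) (q : String × String)
    (hq : q ∈ pvS report) :
    (q.2 ∈ PySem.Set.ofList
        (((pvS report).map (·.2)).filter
          (fun p => k ≤ ((((pvS report).map (·.2)).count p : Nat) : Int)))) ↔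
      k ≤ ((pvR report q.2).length : Int) := by
  rw [PySem.Set.mem_ofList, List.mem_filter]
  have hcnt : (((pvS report).map (·.2)).count q.2 : Nat) = (pvR report q.2).length := by
    rw [pv_count_map, List.countP_eq_length_filter, pv_len_R]
  constructor
  · rintro ⟨-, h⟩
    rw [decide_eq_true_eq, hcnt] at h
    exact h
  · intro h
    exact ⟨List.mem_map_of_mem hq, by rw [decide_eq_true_eq, hcnt]; exact h⟩

-- ===== VERDICT (by name: the statement is the Claim_ definition above) =====
theorem solution_spec : Claim_equal_solution := by
  intro id_list report k _hdom hpre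
  obtain ⟨hlen, hkey⟩ := hpre
  unfold Spec_solution
  rw [pv_solution_eq id_list report k hlen]
  -- A side: values of the bumped seed dict = per-id counts of pvLA
  have hseedkeys : (pvSeed id_list).keys = PySem.Set.ofList id_list := by
    rw [pvSeed, PySem.Dict.keys_foldl_insert id_list (fun _ _ => (0 : Int)) PySem.Dict.empty,
      PySem.Dict.keys_empty]
    rfl
  have hkeysX : ((pvLA report k).foldl pvBump (pvSeed id_list)).keys =
      PySem.Set.ofList id_list := by
    rw [show pvBump = fun pd z => pd.insert z (pd.getD z 0 + 1) from rfl]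
    rw [PySem.Dict.keys_foldl_insert (pvLA report k) (fun d z => d.getD z 0 + 1)
      (pvSeed id_list), hseedkeys]
    exact pv_update_of_forall_mem
      (fun x hx => (PySem.Set.mem_ofList _ _).2 (pv_memA id_list report k hkey x hx))
  have hA : ((pvLA report k).foldl pvBump (pvSeed id_list)).values =
      (PySem.Set.ofList id_list).map
        (fun v => (pvSeed id_list).getD v 0 + ((pvLA report k).count v : Int)) := by
    rw [PySem.Dict.values_eq_map_keys _
      (by rw [hkeysX]; exact PySem.Set.nodup_ofList _) 0, hkeysX]
    refine List.map_congr_left (fun v _ => ?_)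
    rw [show pvBump = fun pd z => pd.insert z (pd.getD z 0 + 1) from rfl]
    exact PySem.Dict.getD_foldl_insert_add_one (pvLA report k) (pvSeed id_list) v
  rw [hA]
  -- B side unfolded
  simp only [solution_alt, PySem.List.dedup_eq_ofList]
  have hpairs : PySem.Set.ofList (report.map (fun c =>
      let ws := PySem.Str.split₀ c
      (ws.getD 0 "", ws.getD 1 ""))) = pvS report := rfl
  rw [hpairs]
  refine List.map_congr_left (fun v hv => ?_)
  have hv0 : (pvSeed id_list).getD v 0 = 0 := by
    rw [pvSeed, pv_seed_getD_aux, if_pos ((PySem.Set.mem_ofList _ _).1 hv)]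
  rw [hv0, zero_add, pv_count_LA_LB report k v, pv_count_LB report k v]
  congr 1
  refine List.countP_congr (fun q hq => ?_)
  have := pv_mem_banned report k q hq
  by_cases hb : k ≤ ((pvR report q.2).length : Int)
  · simp [hb, this.2 hb]
  · have : ¬ (q.2 ∈ PySem.Set.ofList
        (((pvS report).map (·.2)).filter
          (fun p => k ≤ ((((pvS report).map (·.2)).count p : Nat) : Int)))) :=
      fun h => hb (this.1 h)
    simp [hb, this]
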